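-- pv_equiv track=rewrite | github.com/jungokasai/graph_parser | unbounded_dependencies/eval/transform.py | add_coanchor
-- ===== SOURCE A (Python) =====
-- def add_coanchor(parse_t, sent_t):
--     new_edges = []
--     for dep, stag in zip(parse_t, sent_t):
--         if stag == 'tCO':
--             coanchor_id = dep[0]
--             head_id = dep[1]
--             for dep in parse_t:
--                 if (dep[0] == head_id):
--                     new_edges.append((coanchor_id, dep[1], dep[2]))
--                 if (dep[1] == head_id):
--                     new_edges.append((dep[0], coanchor_id, dep[2]))
--     return new_edges
-- ===== SOURCE B (Python) =====
-- def add_coanchor(parse_t, sent_t):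
--     cos = [(dep[0], dep[1]) for dep, stag in zip(parse_t, sent_t) if stag == 'tCO']
--     if not cos:
--         return []
--     pairs = []
--     for dep in parse_t:
--         pairs.append((dep[0], (True, dep)))
--         pairs.append((dep[1], (False, dep)))
--     index = {}
--     for key, entry in pairs:
--         index.setdefault(key, []).append(entry)
--     new_edges = []
--     for co, head in cos:
--         for is_head, dep in index.get(head, []):
--             if is_head:
--                 new_edges.append((co, dep[1], dep[2]))
--             else:
--                 new_edges.append((dep[0], co, dep[2]))
--     return new_edges
-- ===== Notes on version B (the rewrite author's own statement) =====
-- stated objective: alternative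
-- what changed: B builds a hash index from each id value to the ordered list of (is-head, dep) matches once, then emits edges per tCO coanchor by dictionary lookup instead of A's inner rescan of parse_t for every coanchor.
import Mathlib
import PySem

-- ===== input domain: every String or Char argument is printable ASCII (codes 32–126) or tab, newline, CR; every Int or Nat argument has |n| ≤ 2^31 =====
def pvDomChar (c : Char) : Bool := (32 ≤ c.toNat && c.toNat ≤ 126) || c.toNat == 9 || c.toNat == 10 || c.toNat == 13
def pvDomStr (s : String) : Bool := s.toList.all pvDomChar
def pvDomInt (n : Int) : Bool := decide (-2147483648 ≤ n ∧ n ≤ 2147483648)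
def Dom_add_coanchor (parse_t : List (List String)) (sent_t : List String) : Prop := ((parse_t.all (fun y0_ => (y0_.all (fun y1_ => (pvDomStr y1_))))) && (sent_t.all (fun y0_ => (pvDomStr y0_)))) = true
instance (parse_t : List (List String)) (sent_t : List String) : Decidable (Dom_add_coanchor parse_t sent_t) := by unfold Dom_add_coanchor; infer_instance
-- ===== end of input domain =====

-- B replaces A's rescan of parse_t for every tCO coanchor by a dict from id value to its ordered matches (objective: alternative).

-- ===== PORT A =====
def add_coanchor (parse_t : List (List String)) (sent_t : List String) : List (List String) :=
  (parse_t.zip sent_t).foldl (fun new_edges ds =>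
    if ds.2 == "tCO" then
      let coanchor_id := (PySem.List.pyGet? ds.1 0).getD ""
      let head_id := (PySem.List.pyGet? ds.1 1).getD ""
      parse_t.foldl (fun acc dep =>
        let acc := if (PySem.List.pyGet? dep 0).getD "" == head_id then
            acc ++ [[coanchor_id, (PySem.List.pyGet? dep 1).getD "", (PySem.List.pyGet? dep 2).getD ""]]
          else acc
        if (PySem.List.pyGet? dep 1).getD "" == head_id then
          acc ++ [[(PySem.List.pyGet? dep 0).getD "", coanchor_id, (PySem.List.pyGet? dep 2).getD ""]]
        else acc) new_edges
    else new_edges) []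

-- ===== PORT B =====
-- Source B: the (coanchor_id, head_id) list of the tCO tokens
def pvCos (parse_t : List (List String)) (sent_t : List String) : List (String × String) :=
  (parse_t.zip sent_t).foldl (fun acc ds =>
    if ds.2 == "tCO" then acc ++ [(((PySem.List.pyGet? ds.1 0).getD ""), ((PySem.List.pyGet? ds.1 1).getD ""))] else acc) []

-- Source B: the two index pairs one dep contributes, keyed by dep[0] (is_head = True) and dep[1] (is_head = False)
def pvEntries (dep : List String) : List (String × (Bool × List String)) :=
  [(((PySem.List.pyGet? dep 0).getD ""), (true, dep)), (((PySem.List.pyGet? dep 1).getD ""), (false, dep))]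

-- Source B: index = {}; for key, entry in pairs: index.setdefault(key, []).append(entry)
def pvIndex (parse_t : List (List String)) : PySem.Dict String (List (Bool × List String)) :=
  (parse_t.foldl (fun acc dep => acc ++ pvEntries dep) []).foldl
    (fun d p => d.modify p.1 [] (· ++ [p.2])) PySem.Dict.empty

-- Source B: the edge emitted from one index entry for coanchor co
def pvEmit (co : String) (e : Bool × List String) : List String :=
  if e.1 then [co, (PySem.List.pyGet? e.2 1).getD "", (PySem.List.pyGet? e.2 2).getD ""]
  else [(PySem.List.pyGet? e.2 0).getD "", co, (PySem.List.pyGet? e.2 2).getD ""]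

def add_coanchor_alt (parse_t : List (List String)) (sent_t : List String) : List (List String) :=
  if (pvCos parse_t sent_t).isEmpty then [] else
    (pvCos parse_t sent_t).foldl (fun acc ch =>
      ((pvIndex parse_t).getD ch.2 []).foldl (fun acc2 e => acc2 ++ [pvEmit ch.1 e]) acc) []

-- ===== PRECONDITION & SPEC =====
-- Pre_ excludes exactly the inputs on which the Python A raises IndexError: when a tCO tag is present,
-- every dep needs length ≥ 2 (dep[0], dep[1] are read in the inner loop), and any dep whose first or
-- second field matches a coanchor's head id needs length ≥ 3 (dep[2] is read on a match).
def Pre_add_coanchor (parse_t : List (List String)) (sent_t : List String) : Prop :=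
  ((parse_t.zip sent_t).any (fun ds => ds.2 == "tCO")) = true →
    ((parse_t.all (fun dep => 2 ≤ dep.length)) = true ∧
     ∀ ds ∈ parse_t.zip sent_t, ds.2 = "tCO" → ∀ dep ∈ parse_t,
       (dep.getD 0 "" = ds.1.getD 1 "" ∨ dep.getD 1 "" = ds.1.getD 1 "") → 3 ≤ dep.length)
instance (parse_t : List (List String)) (sent_t : List String) : Decidable (Pre_add_coanchor parse_t sent_t) := by
  unfold Pre_add_coanchor; infer_instance

def pvWitness_add_coanchor : List (List String) × List String :=
  ([["1", "0", "nsubj"], ["2", "1", "det"]], ["tCO", "x"])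

def Spec_add_coanchor (parse_t : List (List String)) (sent_t : List String) (out : List (List String)) : Prop := out = add_coanchor_alt parse_t sent_t
instance (parse_t : List (List String)) (sent_t : List String) (out : List (List String)) : Decidable (Spec_add_coanchor parse_t sent_t out) := by unfold Spec_add_coanchor; infer_instance

-- ===== CLAIM (what is proved, stated in full; the proofs are below) =====
def Claim_equal_add_coanchor : Prop := ∀ (parse_t : List (List String)) (sent_t : List String), Dom_add_coanchor parse_t sent_t → Pre_add_coanchor parse_t sent_t → Spec_add_coanchor parse_t sent_t (add_coanchor parse_t sent_t)

-- ===== LEMMAS AND PROOFS =====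

lemma foldl_eq_append_flatMap {α β : Type} (f : List β → α → List β) (g : α → List β)
    (h : ∀ acc x, f acc x = acc ++ g x) : ∀ (l : List α) (acc : List β), l.foldl f acc = acc ++ l.flatMap g := by
  intro l
  induction l with
  | nil => simp
  | cons x xs ih => intro acc; simp [List.foldl_cons, h, ih]

lemma flatMap_single_eq_map {α β : Type} (f : α → β) (l : List α) :
    l.flatMap (fun x => [f x]) = l.map f := by
  induction l with
  | nil => rfl
  | cons x xs ih => simp [ih]

lemma flatMap_if_eq_filter {α β : Type} (p : α → Bool) (g : α → List β) (l : List α) :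
    l.flatMap (fun x => if p x then g x else []) = (l.filter p).flatMap g := by
  induction l with
  | nil => rfl
  | cons x xs ih => by_cases hp : p x <;> simp [hp, ih]

-- the edges A's inner loop appends for one dep, given the coanchor and head ids
def pvG (co h : String) (dep : List String) : List (List String) :=
  (if (PySem.List.pyGet? dep 0).getD "" == h then
      [[co, (PySem.List.pyGet? dep 1).getD "", (PySem.List.pyGet? dep 2).getD ""]] else []) ++
  (if (PySem.List.pyGet? dep 1).getD "" == h then
      [[(PySem.List.pyGet? dep 0).getD "", co, (PySem.List.pyGet? dep 2).getD ""]] else [])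

lemma add_coanchor_eq_flatMap (parse_t : List (List String)) (sent_t : List String) :
    add_coanchor parse_t sent_t =
      ((parse_t.zip sent_t).filter (fun ds => ds.2 == "tCO")).flatMap
        (fun ds => parse_t.flatMap (pvG ((PySem.List.pyGet? ds.1 0).getD "") ((PySem.List.pyGet? ds.1 1).getD ""))) := by
  unfold add_coanchor
  rw [foldl_eq_append_flatMap _
      (fun ds => if ds.2 == "tCO" then
        parse_t.flatMap (pvG ((PySem.List.pyGet? ds.1 0).getD "") ((PySem.List.pyGet? ds.1 1).getD "")) else [])]
  · rw [List.nil_append, flatMap_if_eq_filter]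
  · intro acc ds
    by_cases hc : ds.2 == "tCO"
    · simp only [hc, if_true]
      rw [foldl_eq_append_flatMap _ (pvG ((PySem.List.pyGet? ds.1 0).getD "") ((PySem.List.pyGet? ds.1 1).getD ""))]
      intro acc2 dep
      unfold pvG
      by_cases h0 : (PySem.List.pyGet? dep 0).getD "" == (PySem.List.pyGet? ds.1 1).getD "" <;>
        by_cases h1 : (PySem.List.pyGet? dep 1).getD "" == (PySem.List.pyGet? ds.1 1).getD "" <;>
        simp [h0, h1]
    · simp [hc]

lemma cos_eq (parse_t : List (List String)) (sent_t : List String) :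
    pvCos parse_t sent_t =
      ((parse_t.zip sent_t).filter (fun ds => ds.2 == "tCO")).map
        (fun ds => (((PySem.List.pyGet? ds.1 0).getD ""), ((PySem.List.pyGet? ds.1 1).getD ""))) := by
  unfold pvCos
  rw [PySem.List.foldl_append_if, List.nil_append]

lemma index_emit (parse_t : List (List String)) (co h : String) :
    ((pvIndex parse_t).getD h []).map (pvEmit co) = parse_t.flatMap (pvG co h) := by
  unfold pvIndex
  rw [foldl_eq_append_flatMap _ pvEntries (fun _ _ => rfl), List.nil_append]
  rw [PySem.Dict.getD_foldl_modify_append, PySem.Dict.getD_empty, List.nil_append]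
  rw [List.map_map, List.filter_flatMap, List.map_flatMap]
  apply List.flatMap_congr  -- or congrArg; fall back to funext-style
  intro dep _
  unfold pvEntries pvEmit pvG
  by_cases h0 : (PySem.List.pyGet? dep 0).getD "" == h <;>
    by_cases h1 : (PySem.List.pyGet? dep 1).getD "" == h <;>
    simp [h0, h1]

lemma add_coanchor_alt_eq_flatMap (parse_t : List (List String)) (sent_t : List String) :
    add_coanchor_alt parse_t sent_t =
      ((parse_t.zip sent_t).filter (fun ds => ds.2 == "tCO")).flatMap
        (fun ds => parse_t.flatMap (pvG ((PySem.List.pyGet? ds.1 0).getD "") ((PySem.List.pyGet? ds.1 1).getD ""))) := by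
  unfold add_coanchor_alt
  by_cases he : (pvCos parse_t sent_t).isEmpty
  · rw [if_pos he]
    have hnil : (parse_t.zip sent_t).filter (fun ds => ds.2 == "tCO") = [] := by
      rw [cos_eq] at he
      exact List.map_eq_nil_iff.mp (List.isEmpty_iff.mp he)
    rw [hnil]
    rfl
  · rw [if_neg he]
    rw [foldl_eq_append_flatMap _ (fun ch => ((pvIndex parse_t).getD ch.2 []).map (pvEmit ch.1))
        (by intro acc ch
            rw [foldl_eq_append_flatMap _ (fun e => [pvEmit ch.1 e]) (fun _ _ => rfl)]
            simp [flatMap_single_eq_map])]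
    rw [List.nil_append, cos_eq, List.flatMap_map]
    apply List.flatMap_congr
    intro ds _
    exact index_emit parse_t _ _

-- ===== VERDICT (by name: the statement is the Claim_ definition above) =====
theorem add_coanchor_spec : Claim_equal_add_coanchor := by
  intro parse_t sent_t _ _
  unfold Spec_add_coanchor
  rw [add_coanchor_eq_flatMap, add_coanchor_alt_eq_flatMap]
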